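-- pv_equiv track=rewrite | github.com/PatrickDrummond/Automata_Transistion_Table_Illustrator | PA_3.py | grid_format
-- ===== SOURCE A (Python) =====
-- def grid_format(item):
--
--     if len(item) < 9:
--         missing = 9 - len(item)
--         for i in range(0, missing):
--             item = " " + item
--     else:
--         i = 1
--     return item
-- ===== SOURCE B (Python) =====
-- def grid_format(item):
--     if len(item) >= 9:
--         return item
--     return " " * (9 - len(item)) + item
-- ===== Notes on version B (the rewrite author's own statement) =====
-- stated objective: simpler
-- what changed: Replaces the per-character loop that prepends one space at a time (and the dead else branch) with a single closed-form construction of the whole pad via string repetition and one concatenation.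
import Mathlib
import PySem

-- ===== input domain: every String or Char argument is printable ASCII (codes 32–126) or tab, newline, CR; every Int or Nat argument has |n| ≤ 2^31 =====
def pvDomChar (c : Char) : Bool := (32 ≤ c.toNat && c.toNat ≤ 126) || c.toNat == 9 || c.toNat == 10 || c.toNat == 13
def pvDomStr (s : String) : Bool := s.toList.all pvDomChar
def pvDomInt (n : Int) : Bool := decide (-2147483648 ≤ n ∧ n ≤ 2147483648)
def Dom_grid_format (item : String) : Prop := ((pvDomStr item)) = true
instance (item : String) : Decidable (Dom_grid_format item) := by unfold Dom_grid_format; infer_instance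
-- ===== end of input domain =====

-- B replaces A's per-character space-prepending loop by a one-shot closed-form pad (simpler).

-- ===== PORT A =====
-- A: if len(item) < 9, loop `for i in range(0, missing)` prepending " " each time; else (dead `i = 1`) return item unchanged.
def grid_format (item : String) : String :=
  if PySem.Str.len item < 9 then
    (PySem.List.pyRange 0 (9 - PySem.Str.len item) 1).foldl
      (fun acc _ => String.ofList (' ' :: acc.toList)) item
  else item

-- ===== PORT B =====
-- B: closed form " " * (9 - len(item)) + item.
def grid_format_alt (item : String) : String :=
  if PySem.Str.len item ≥ 9 then item
  else String.ofList (List.replicate (9 - PySem.Str.len item).toNat ' ' ++ item.toList)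

-- ===== PRECONDITION & SPEC =====
def Spec_grid_format (item : String) (out : String) : Prop := out = grid_format_alt item
instance (item : String) (out : String) : Decidable (Spec_grid_format item out) := by unfold Spec_grid_format; infer_instance

-- ===== CLAIM (what is proved, stated in full; the proofs are below) =====
def Claim_equal_grid_format : Prop := ∀ (item : String), Dom_grid_format item → Spec_grid_format item (grid_format item)

-- ===== LEMMAS AND PROOFS =====

-- Folding the space-prepending step over any list prepends l.length spaces.
theorem foldl_prepend_space (l : List Int) (s : String) :
    l.foldl (fun acc _ => String.ofList (' ' :: acc.toList)) s
      = String.ofList (List.replicate l.length ' ' ++ s.toList) := by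
  induction l generalizing s with
  | nil => simp [String.ofList_toList]
  | cons x xs ih =>
      simp only [List.foldl_cons, ih, List.length_cons]
      congr 1
      simp [List.replicate_succ', String.toList_ofList]

-- ===== VERDICT (by name: the statement is the Claim_ definition above) =====
theorem grid_format_spec : Claim_equal_grid_format := by
  intro item _
  unfold Spec_grid_format grid_format grid_format_alt
  by_cases h : PySem.Str.len item < 9
  · rw [if_pos h, if_neg (by omega), foldl_prepend_space]
    congr 2
    have h0 : (0:Int) ≤ 9 - PySem.Str.len item := by
      have := PySem.Str.len_eq item
      simp [PySem.Str.len] at *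
      omega
    simp [PySem.List.length_pyRange_one]
  · rw [if_neg h, if_pos (by omega)]
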